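-- pv_equiv track=rewrite | github.com/thiagomartendal/TrabalhoFormais2 | classes/Expressao.py | novo_nome
-- ===== SOURCE A (Python) =====
-- def novo_nome(lista):
--     from string import ascii_uppercase
--     novo_nome = None
--     for letra in ascii_uppercase:
--         if letra not in lista:
--             novo_nome = letra
--             break
--
--     if novo_nome == None:
--         found = False
--         for letra in ascii_uppercase:
--             for letra2 in ascii_uppercase:
--                 novo = letra + letra2
--                 if novo not in lista:
--                     novo_nome = novo
--                     found = True
--                     break
--             if found:
--                 break
--
--     lista.append(novo_nome)
--     return novo_nome
-- ===== SOURCE B (Python) =====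
-- def _indice(s):
--     # index of a candidate name in the A..Z, AA..ZZ sequence, or None
--     if len(s) == 1 and 'A' <= s[0] <= 'Z':
--         return ord(s[0]) - 65
--     if len(s) == 2 and 'A' <= s[0] <= 'Z' and 'A' <= s[1] <= 'Z':
--         return 26 + (ord(s[0]) - 65) * 26 + (ord(s[1]) - 65)
--     return None
--
--
-- def _nome(m):
--     if m < 26:
--         return chr(65 + m)
--     q, r = divmod(m - 26, 26)
--     return chr(65 + q) + chr(65 + r)
--
--
-- def novo_nome(lista):
--     # map the used names to their candidate indices, then take the mex
--     # (smallest missing index) by a gap scan over the sorted index set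
--     indices = set()
--     for s in lista:
--         k = _indice(s)
--         if k is not None:
--             indices.add(k)
--     m = 0
--     for k in sorted(indices):
--         if k != m:
--             break
--         m += 1
--     nome = _nome(m) if m < 702 else None
--     lista.append(nome)
--     return nome
-- ===== Notes on version B (the rewrite author's own statement) =====
-- stated objective: alternative
-- what changed: Instead of scanning candidates one by one and testing each for membership in lista, B maps every used name to its index in the A..Z, AA..ZZ order, sorts the resulting index set and finds the smallest missing index (mex) by a single gap scan, then converts that index back to a name.
import Mathlib
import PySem

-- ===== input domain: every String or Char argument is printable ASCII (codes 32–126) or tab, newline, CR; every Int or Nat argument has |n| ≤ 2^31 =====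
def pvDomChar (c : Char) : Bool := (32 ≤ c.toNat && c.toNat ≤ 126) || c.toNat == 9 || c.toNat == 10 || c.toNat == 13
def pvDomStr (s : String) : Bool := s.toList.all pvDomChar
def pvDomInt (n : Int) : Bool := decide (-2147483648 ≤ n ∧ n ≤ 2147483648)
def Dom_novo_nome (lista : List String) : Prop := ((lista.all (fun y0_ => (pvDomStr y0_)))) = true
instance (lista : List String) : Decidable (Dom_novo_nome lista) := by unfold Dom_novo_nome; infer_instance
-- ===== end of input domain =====

-- B replaces A's candidate-by-candidate membership search (single-letter loop, then
-- flag-guarded nested double-letter loops) by a mex computation: it maps each used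
-- name to its index in the A..Z, AA..ZZ order, sorts the index set, finds the first
-- gap by one scan, and converts that index back to a name (objective: alternative).
-- Equivalence is about the RETURN value only: both Pythons also append the result
-- (possibly None) to lista in place; that mutation is not modelled here.

-- ===== PORT A =====
def pyAsciiUppercase : List Char := "ABCDEFGHIJKLMNOPQRSTUVWXYZ".toList

def novo_nome (lista : List String) : Option String :=
  -- first loop with break: first single letter not in lista
  match pyAsciiUppercase.find? (fun letra => !(lista.contains (String.ofList [letra]))) with
  | some letra => some (String.ofList [letra])
  | none =>
      -- nested loops with the 'found' flag and double break
      pyAsciiUppercase.findSome? (fun letra =>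
        (pyAsciiUppercase.find? (fun letra2 => !(lista.contains (String.ofList [letra, letra2])))).map
          (fun letra2 => String.ofList [letra, letra2]))

-- ===== PORT B =====
-- _indice: index of a candidate name in the A..Z, AA..ZZ sequence, or None
def pvIdxC? (l : List Char) : Option Nat :=
  match l with
  | [c] => if 'A' ≤ c ∧ c ≤ 'Z' then some (c.toNat - 65) else none
  | [c, d] =>
      if ('A' ≤ c ∧ c ≤ 'Z') ∧ ('A' ≤ d ∧ d ≤ 'Z') then
        some (26 + (c.toNat - 65) * 26 + (d.toNat - 65))
      else none
  | _ => none

def pvIdx? (s : String) : Option Nat := pvIdxC? s.toList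

-- _nome: the candidate name with index m (as its character list, then a String)
def pvNomeC (m : Nat) : List Char :=
  if m < 26 then [Char.ofNat (65 + m)]
  else [Char.ofNat (65 + (m - 26) / 26), Char.ofNat (65 + (m - 26) % 26)]

def pvNome (m : Nat) : String := String.ofList (pvNomeC m)

-- the 'for k in usados: if k != m: break; m += 1' gap scan
def pvMexLoop : List Nat → Nat → Nat
  | [], m => m
  | k :: rest, m => if k ≠ m then m else pvMexLoop rest (m + 1)

def novo_nome_alt (lista : List String) : Option String :=
  let indices : PySem.Set Nat :=
    lista.foldl (fun s x => match pvIdx? x with | some k => PySem.Set.add s k | none => s)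
      PySem.Set.empty
  let m := pvMexLoop (PySem.List.sorted indices (fun x => x) false) 0
  if m < 702 then some (pvNome m) else none

-- ===== PRECONDITION & SPEC =====
def Spec_novo_nome (lista : List String) (out : Option String) : Prop := out = novo_nome_alt lista
instance (lista : List String) (out : Option String) : Decidable (Spec_novo_nome lista out) := by unfold Spec_novo_nome; infer_instance

-- ===== CLAIM (what is proved, stated in full; the proofs are below) =====
def Claim_equal_novo_nome : Prop := ∀ (lista : List String), Dom_novo_nome lista → Spec_novo_nome lista (novo_nome lista)

-- ===== LEMMAS AND PROOFS =====

-- A's first loop-with-break, written as '.map' of a find? over letters, is find? over the mapped candidates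
theorem pv_find_map {β : Type} (p : String → Bool) (f : β → String) (l : List β) :
    (l.find? (fun c => p (f c))).map f = (l.map f).find? p := by
  rw [List.find?_map]; rfl

-- the flag-guarded nested loops of A are find? over the flattened candidate pairs
theorem pv_nested_eq_flat (p : String → Bool) (f : Char → Char → String)
    (outer inner : List Char) :
    outer.findSome? (fun l => (inner.find? (fun l2 => p (f l l2))).map (f l)) =
    (outer.flatMap (fun l => inner.map (f l))).find? p := by
  induction outer with
  | nil => simp
  | cons l rest ih =>
      simp only [List.findSome?_cons, List.flatMap_cons, List.find?_append, List.find?_map]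
      rw [← ih]
      cases h : inner.find? (fun l2 => p (f l l2)) <;>
        simp [Function.comp_def, h]

set_option maxRecDepth 8000 in
theorem pv_cands_eq :
    (List.range 702).map pvNome =
      pyAsciiUppercase.map (fun c => String.ofList [c]) ++
      pyAsciiUppercase.flatMap (fun l => pyAsciiUppercase.map (fun l2 => String.ofList [l, l2])) := by
  decide

-- A as a find? over candidate indices 0..701
theorem pv_A_as_find (lista : List String) :
    novo_nome lista =
      ((List.range 702).find? (fun k => !(lista.contains (pvNome k)))).map pvNome := by
  unfold novo_nome
  rw [pv_find_map (fun s => !(lista.contains s)) pvNome, pv_cands_eq, List.find?_append,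
      ← pv_find_map (fun s => !(lista.contains s)) (fun c => String.ofList [c]),
      ← pv_nested_eq_flat (fun s => !(lista.contains s)) (fun l l2 => String.ofList [l, l2])]
  cases pyAsciiUppercase.find? (fun c => !(lista.contains (String.ofList [c]))) <;> simp

-- pvIdx? inverts pvNome on indices below 702
set_option maxRecDepth 8000 in
theorem pv_idx_nome : ∀ k < 702, pvIdx? (pvNome k) = some k := by decide

-- and pvNome inverts pvIdx? (list level)
theorem pv_nomeC_idxC (l : List Char) (k : Nat) (h : pvIdxC? l = some k) : pvNomeC k = l := by
  match l with
  | [] => simp [pvIdxC?] at h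
  | [c] =>
      simp only [pvIdxC?] at h
      split_ifs at h with hc
      · obtain ⟨h1, h2⟩ := hc
        injection h with hk
        have hc1 : 65 ≤ c.toNat := Nat.succ_le_of_lt h1
        have hc2 : c.toNat ≤ 90 := Fin.mk_le_mk.mp h2
        have hlt : k < 26 := by omega
        have he : 65 + k = c.toNat := by omega
        rw [pvNomeC, if_pos hlt, he, Char.ofNat_toNat]
  | [c, d] =>
      simp only [pvIdxC?] at h
      split_ifs at h with hc
      · obtain ⟨⟨h1, h2⟩, h3, h4⟩ := hc
        injection h with hk
        have hc1 : 65 ≤ c.toNat := Nat.succ_le_of_lt h1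
        have hc2 : c.toNat ≤ 90 := Fin.mk_le_mk.mp h2
        have hd1 : 65 ≤ d.toNat := Nat.succ_le_of_lt h3
        have hd2 : d.toNat ≤ 90 := Fin.mk_le_mk.mp h4
        have hge : ¬ k < 26 := by omega
        have hq : 65 + (k - 26) / 26 = c.toNat := by omega
        have hr : 65 + (k - 26) % 26 = d.toNat := by omega
        rw [pvNomeC, if_neg hge, hq, hr, Char.ofNat_toNat, Char.ofNat_toNat]
  | _ :: _ :: _ :: _ => simp [pvIdxC?] at h

theorem pv_nome_idx (s : String) (k : Nat) (h : pvIdx? s = some k) : pvNome k = s := by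
  rw [pvNome, pv_nomeC_idxC s.toList k h, String.ofList_toList]

-- membership bridge: candidate k is used ↔ k is an index of some used name
theorem pv_contains_bridge (lista : List String) (k : Nat) (hk : k < 702) :
    lista.contains (pvNome k) = (lista.filterMap pvIdx?).contains k := by
  rw [Bool.eq_iff_iff]
  simp only [List.contains_iff_mem, List.mem_filterMap]
  constructor
  · intro h; exact ⟨pvNome k, h, pv_idx_nome k hk⟩
  · rintro ⟨s, hs, hidx⟩; rw [pv_nome_idx s k hidx]; exact hs

-- B's set-building loop is set(filterMap)
theorem pv_fold_filterMap (lista : List String) (s0 : PySem.Set Nat) :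
    lista.foldl (fun s x => match pvIdx? x with | some k => PySem.Set.add s k | none => s) s0
      = (lista.filterMap pvIdx?).foldl PySem.Set.add s0 := by
  induction lista generalizing s0 with
  | nil => rfl
  | cons x rest ih =>
      simp only [List.foldl_cons, List.filterMap_cons]
      cases pvIdx? x <;> simp [ih]

theorem pvMexLoop_cons (k : Nat) (rest : List Nat) (m : Nat) :
    pvMexLoop (k :: rest) m = if k ≠ m then m else pvMexLoop rest (m + 1) := rfl

-- the gap scan returns the smallest value ≥ m missing from a strictly sorted list
theorem pv_mex_spec (l : List Nat) : ∀ (m : Nat), l.Pairwise (· < ·) → (∀ x ∈ l, m ≤ x) →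
    (∀ j, m ≤ j → j < pvMexLoop l m → j ∈ l) ∧ pvMexLoop l m ∉ l ∧ m ≤ pvMexLoop l m := by
  induction l with
  | nil =>
      intro m _ _
      simp only [pvMexLoop]
      exact ⟨fun j h1 h2 => absurd h2 (by omega), by simp, le_refl m⟩
  | cons k rest ih =>
      intro m hs hm
      rw [List.pairwise_cons] at hs
      obtain ⟨hk, hrest⟩ := hs
      rw [pvMexLoop_cons]
      by_cases hkm : k = m
      · subst hkm
        rw [if_neg (by omega)]
        have hm' : ∀ x ∈ rest, k + 1 ≤ x := fun x hx => Nat.succ_le_of_lt (hk x hx)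
        obtain ⟨h1, h2, h3⟩ := ih (k + 1) hrest hm'
        refine ⟨fun j hj1 hj2 => ?_, ?_, by omega⟩
        · by_cases hjk : j = k
          · simp [hjk]
          · exact List.mem_cons_of_mem _ (h1 j (by omega) hj2)
        · simp only [List.mem_cons, not_or]
          exact ⟨by omega, h2⟩
      · rw [if_pos hkm]
        have hmk : m < k := lt_of_le_of_ne (hm k List.mem_cons_self) (Ne.symm hkm)
        refine ⟨fun j h1 h2 => by omega, ?_, le_refl m⟩
        simp only [List.mem_cons, not_or]
        exact ⟨by omega, fun hmem => absurd (hk m hmem) (by omega)⟩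

-- find? over a range, given the least witness
theorem pv_find_range (p : Nat → Bool) (N r : Nat) (hlt : ∀ j < r, p j = false)
    (hp : p r = true) :
    (List.range N).find? p = if r < N then some r else none := by
  induction N with
  | zero => simp
  | succ n ih =>
      rw [List.range_succ, List.find?_append, ih]
      by_cases h1 : r < n
      · simp [h1, Nat.lt_succ_of_lt h1]
      · by_cases h2 : r = n
        · subst h2; simp [hp]
        · have h3 : n < r := by omega
          simp [h1, hlt n h3, (show ¬ r ≤ n by omega)]

-- find? only looks at the predicate on the list's members
theorem pv_find_congr {α : Type} (p q : α → Bool) (l : List α) (h : ∀ x ∈ l, p x = q x) :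
    l.find? p = l.find? q := by
  induction l with
  | nil => rfl
  | cons a t ih =>
      simp only [List.find?_cons]
      rw [h a List.mem_cons_self]
      cases q a <;> simp [ih (fun x hx => h x (List.mem_cons_of_mem _ hx))]

-- ===== VERDICT (by name: the statement is the Claim_ definition above) =====
theorem novo_nome_spec : Claim_equal_novo_nome := by
  intro lista _
  show novo_nome lista = novo_nome_alt lista
  rw [pv_A_as_find]
  unfold novo_nome_alt
  simp only [pv_fold_filterMap]
  set L := lista.filterMap pvIdx? with hL
  have hofL : List.foldl PySem.Set.add PySem.Set.empty L = PySem.Set.ofList L :=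
    (PySem.Set.ofList_eq_foldl L).symm
  rw [hofL]
  set S := PySem.List.sorted (PySem.Set.ofList L) (fun x => x) false with hS
  have hpair : S.Pairwise (· < ·) := PySem.List.sorted_ofList_pairwise_lt L
  have hmemS : ∀ x, x ∈ S ↔ x ∈ L := by
    intro x
    rw [hS, PySem.List.mem_sorted, PySem.Set.mem_ofList]
  obtain ⟨h1, h2, _⟩ := pv_mex_spec S 0 hpair (fun x _ => Nat.zero_le x)
  set r := pvMexLoop S 0 with hr
  have hfind : (List.range 702).find? (fun k => !(L.contains k)) =
      if r < 702 then some r else none := by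
    apply pv_find_range
    · intro j hj
      have : j ∈ L := (hmemS j).mp (h1 j (Nat.zero_le j) hj)
      simp [this]
    · have : r ∉ L := fun h => h2 ((hmemS r).mpr h)
      simp [this]
  have hcong : (List.range 702).find? (fun k => !(lista.contains (pvNome k))) =
      (List.range 702).find? (fun k => !(L.contains k)) := by
    apply pv_find_congr
    intro k hk
    rw [pv_contains_bridge lista k (by simpa using (List.mem_range.mp hk))]
  rw [hcong, hfind]
  by_cases h : r < 702 <;> simp [h]
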